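-- pv_equiv track=rewrite | github.com/MertGursimsir/GTU-University-Assignments | CSE 321 - Introduction to Algorithm Design/5/1901042646_mertGursimsir_hw5.py | find_min_and_index
-- ===== SOURCE A (Python) =====
-- def find_min_and_index(array, left, right):
--   minimum = array[left]
--   index = left
--   for i in range(left + 1, right + 1):
--     if array[i] < minimum:
--       minimum = array[i]
--       index = i
--   return (minimum, index)
-- ===== SOURCE B (Python) =====
-- def find_min_and_index(array, left, right):
--     minimum = array[left]
--     for i in range(left + 1, right + 1):
--         if array[i] < minimum:
--             minimum = array[i]
--     for i in range(left, right + 1):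
--         if array[i] == minimum:
--             return (minimum, i)
--     return (minimum, left)
-- ===== Notes on version B (the rewrite author's own statement) =====
-- stated objective: alternative
-- what changed: Single tracked-index scan replaced by a two-pass decomposition: one pass computes only the minimum value, a second pass locates the first index holding that value (early return).
import Mathlib
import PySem

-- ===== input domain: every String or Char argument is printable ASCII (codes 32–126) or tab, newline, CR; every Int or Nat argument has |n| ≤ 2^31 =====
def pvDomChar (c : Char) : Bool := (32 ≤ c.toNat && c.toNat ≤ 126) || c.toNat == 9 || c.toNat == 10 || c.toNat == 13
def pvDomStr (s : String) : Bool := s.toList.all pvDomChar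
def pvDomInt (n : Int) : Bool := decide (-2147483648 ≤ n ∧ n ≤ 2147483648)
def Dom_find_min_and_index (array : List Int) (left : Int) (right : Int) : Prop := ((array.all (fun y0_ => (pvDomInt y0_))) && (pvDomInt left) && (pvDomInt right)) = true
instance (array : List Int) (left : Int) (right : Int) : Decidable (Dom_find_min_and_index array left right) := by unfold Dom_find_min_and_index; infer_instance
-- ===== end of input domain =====

-- B replaces A's single scan that tracks (minimum, index) together by a two-pass
-- decomposition: one pass over the range computing only the minimum value, then a
-- second pass returning at the first index whose element equals that value.
-- Objective: alternative decomposition (same asymptotic cost).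

-- ===== PORT A =====
def find_min_and_index (array : List Int) (left : Int) (right : Int) : Int × Int :=
  match PySem.List.pyGet? array left with
  | none => (0, 0)  -- IndexError in Python; excluded by Pre_
  | some m0 =>
    (PySem.List.pyRange (left + 1) (right + 1) 1).foldl
      (fun (p : Int × Int) i =>
        match PySem.List.pyGet? array i with
        | none => p  -- IndexError in Python; excluded by Pre_
        | some v => if v < p.1 then (v, i) else p)
      (m0, left)

-- ===== PORT B =====
-- helper: B's second loop with its early return (first i in the index list whose
-- element equals m)
def pvLocate (array : List Int) (m : Int) : List Int → Option Int
  | [] => none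
  | i :: rest =>
    if PySem.List.pyGet? array i = some m then some i else pvLocate array m rest

def find_min_and_index_alt (array : List Int) (left : Int) (right : Int) : Int × Int :=
  match PySem.List.pyGet? array left with
  | none => (0, 0)  -- IndexError in Python; excluded by Pre_
  | some m0 =>
    let m := (PySem.List.pyRange (left + 1) (right + 1) 1).foldl
      (fun (acc : Int) i =>
        match PySem.List.pyGet? array i with
        | none => acc  -- IndexError in Python; excluded by Pre_
        | some v => if v < acc then v else acc)
      m0
    match pvLocate array m (PySem.List.pyRange left (right + 1) 1) with
    | some i => (m, i)
    | none => (m, left)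

-- ===== PRECONDITION & SPEC =====
-- exactly the inputs where the Python A returns: array[left] must exist and, since
-- every further index the loop touches lies in (left, right], right < len(array)
-- suffices (indices below -len are unreachable because left ≥ -len).
def Pre_find_min_and_index (array : List Int) (left : Int) (right : Int) : Prop :=
  PySem.Raise.InRange array.length left ∧ right < (array.length : Int)
instance (array : List Int) (left : Int) (right : Int) : Decidable (Pre_find_min_and_index array left right) := by unfold Pre_find_min_and_index; infer_instance

def pvWitness_find_min_and_index : List Int × Int × Int := ([3, 1, 2, 1], 0, 3)

def Spec_find_min_and_index (array : List Int) (left : Int) (right : Int) (out : Int × Int) : Prop := out = find_min_and_index_alt array left right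
instance (array : List Int) (left : Int) (right : Int) (out : Int × Int) : Decidable (Spec_find_min_and_index array left right out) := by unfold Spec_find_min_and_index; infer_instance

-- ===== CLAIM (what is proved, stated in full; the proofs are below) =====
def Claim_equal_find_min_and_index : Prop := ∀ (array : List Int) (left : Int) (right : Int), Dom_find_min_and_index array left right → Pre_find_min_and_index array left right → Spec_find_min_and_index array left right (find_min_and_index array left right)

-- ===== LEMMAS AND PROOFS =====

-- A's fold step and B's value-only fold step, named for the lemmas
def pvStepA (array : List Int) (p : Int × Int) (i : Int) : Int × Int :=
  match PySem.List.pyGet? array i with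
  | none => p
  | some v => if v < p.1 then (v, i) else p

def pvStepV (array : List Int) (acc : Int) (i : Int) : Int :=
  match PySem.List.pyGet? array i with
  | none => acc
  | some v => if v < acc then v else acc

theorem pvFst_foldA (array : List Int) (l : List Int) :
    ∀ (m j : Int), (l.foldl (pvStepA array) (m, j)).1 = l.foldl (pvStepV array) m := by
  induction l with
  | nil => intro m j; rfl
  | cons i rest ih =>
    intro m j
    simp only [List.foldl_cons, pvStepA, pvStepV]
    cases h : PySem.List.pyGet? array i with
    | none => exact ih m j
    | some v =>
      by_cases hv : v < m
      · simp only [hv, if_pos]; exact ih v i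
      · simp only [hv, if_neg, not_false_iff]; exact ih m j

theorem pvFoldV_le (array : List Int) (l : List Int) :
    ∀ (m : Int), l.foldl (pvStepV array) m ≤ m := by
  induction l with
  | nil => intro m; exact le_refl m
  | cons i rest ih =>
    intro m
    simp only [List.foldl_cons, pvStepV]
    cases h : PySem.List.pyGet? array i with
    | none => exact ih m
    | some v =>
      by_cases hv : v < m
      · simp only [hv, if_pos]; exact le_trans (ih v) (le_of_lt hv)
      · simp only [hv, if_neg, not_false_iff]; exact ih m

-- the heart: the first index in j :: l whose element equals the folded minimum is
-- exactly the index A's combined fold tracks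
theorem pvLocate_foldA (array : List Int) (l : List Int) :
    ∀ (m j : Int), PySem.List.pyGet? array j = some m →
      pvLocate array (l.foldl (pvStepV array) m) (j :: l)
        = some (l.foldl (pvStepA array) (m, j)).2 := by
  induction l with
  | nil =>
    intro m j hj
    simp [pvLocate, hj]
  | cons i rest ih =>
    intro m j hj
    simp only [List.foldl_cons, pvStepA, pvStepV]
    cases h : PySem.List.pyGet? array i with
    | none =>
      -- skip the invalid index on both sides
      have := ih m j hj
      simp only [pvLocate, h] at this ⊢
      simpa using this
    | some v =>
      by_cases hv : v < m
      · -- new minimum candidate at i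
        simp only [hv, if_pos]
        have hrec := ih v i h
        have hlt : rest.foldl (pvStepV array) v < m :=
          lt_of_le_of_lt (pvFoldV_le array rest v) hv
        have hne : PySem.List.pyGet? array j ≠ some (rest.foldl (pvStepV array) v) := by
          rw [hj]; intro hc
          exact absurd (Option.some.inj hc) (by omega)
        simp only [pvLocate, if_neg hne]
        exact hrec
      · simp only [hv, if_neg, not_false_iff]
        have hrec := ih m j hj
        by_cases hjm : PySem.List.pyGet? array j = some (rest.foldl (pvStepV array) m)
        · simp only [pvLocate, if_pos hjm] at hrec ⊢
          exact hrec
        · have hm_lt : rest.foldl (pvStepV array) m < m := by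
            rcases lt_or_eq_of_le (pvFoldV_le array rest m) with h' | h'
            · exact h'
            · exact absurd (by rw [hj, h']) hjm
          have hne_i : PySem.List.pyGet? array i ≠ some (rest.foldl (pvStepV array) m) := by
            rw [h]; intro hc
            have hvm := Option.some.inj hc
            omega
          simp only [pvLocate, if_neg hjm, if_neg hne_i] at hrec ⊢
          exact hrec

-- ===== VERDICT (by name: the statement is the Claim_ definition above) =====
theorem find_min_and_index_spec : Claim_equal_find_min_and_index := by
  intro array left right _ hpre
  rcases hpre with ⟨hL, hR⟩
  unfold Spec_find_min_and_index find_min_and_index find_min_and_index_alt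
  cases hget : PySem.List.pyGet? array left with
  | none =>
    exact absurd hL (by rwa [PySem.List.pyGet?_eq_none_iff] at hget)
  | some m0 =>
    simp only
    -- identify the folds with the named step functions
    show (List.foldl (pvStepA array) (m0, left) _) =
      (match pvLocate array (List.foldl (pvStepV array) m0 _) (PySem.List.pyRange left (right + 1) 1) with
       | some i => (List.foldl (pvStepV array) m0 _, i)
       | none => (List.foldl (pvStepV array) m0 _, left))
    by_cases hlr : left < right + 1
    · rw [PySem.List.pyRange_one_cons hlr,
        pvLocate_foldA array _ m0 left hget]
      exact Prod.ext (pvFst_foldA array _ m0 left) rfl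
    · have hnil : PySem.List.pyRange left (right + 1) 1 = [] :=
        PySem.List.pyRange_one_eq_nil (by omega)
      have hnil' : PySem.List.pyRange (left + 1) (right + 1) 1 = [] :=
        PySem.List.pyRange_one_eq_nil (by omega)
      rw [hnil, hnil']
      rfl
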